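-- pv_equiv track=rewrite | github.com/true-grue/brus_sfx | sfx_pack.py | pack_binary
-- ===== SOURCE A (Python) =====
-- def pack_binary(data):
--     res = []
--     for row in data:
--         new_row = []
--         for i, (x, y) in enumerate(row):
--             new_row.append(x << 9 | y | (i == 0) << 15)
--         res += new_row
--     return res
-- ===== SOURCE B (Python) =====
-- def pack_binary(data):
--     # Phase 1: pack everything uniformly into one flat list.
--     flat = [x << 9 | y for row in data for (x, y) in row]
--     # Phase 2: compute the global start position of each non-empty row.
--     starts = []
--     pos = 0
--     for row in data:
--         if row:
--             starts.append(pos)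
--         pos += len(row)
--     # Phase 3: mark the row-start positions with the high bit.
--     return [v | 1 << 15 if i in starts else v for i, v in enumerate(flat)]
-- ===== Notes on version B (the rewrite author's own statement) =====
-- stated objective: alternative
-- what changed: B works in three global phases instead of A's nested per-row loop: it packs all pairs into one flat list, computes the global start offset of every non-empty row from the row lengths, and then marks exactly those global positions with the high bit.
import Mathlib
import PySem

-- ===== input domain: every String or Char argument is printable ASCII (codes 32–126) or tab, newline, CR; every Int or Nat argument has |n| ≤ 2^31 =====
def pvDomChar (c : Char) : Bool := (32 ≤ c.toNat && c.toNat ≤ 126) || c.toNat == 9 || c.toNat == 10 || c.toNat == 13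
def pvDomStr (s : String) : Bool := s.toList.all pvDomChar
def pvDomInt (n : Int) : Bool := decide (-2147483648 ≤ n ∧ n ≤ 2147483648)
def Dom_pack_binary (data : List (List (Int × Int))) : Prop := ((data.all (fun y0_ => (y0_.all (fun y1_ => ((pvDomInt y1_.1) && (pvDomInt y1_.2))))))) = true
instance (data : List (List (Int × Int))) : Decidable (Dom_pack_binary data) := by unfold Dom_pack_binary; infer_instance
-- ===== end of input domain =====

-- B replaces A's nested per-row loop by three global phases: pack all pairs into one
-- flat list, compute the start offsets of the non-empty rows, mark those positions
-- (objective: alternative decomposition, same result).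

-- ===== PORT A =====
def pack_binary (data : List (List (Int × Int))) : List Int :=
  data.foldl (fun res row =>
    res ++ (PySem.List.enumerate row).foldl
      (fun new_row ip =>
        new_row ++ [PySem.Int.bor (PySem.Int.bor (ip.2.1 <<< (9:Int)) ip.2.2)
                      ((if ip.1 == 0 then (1:Int) else 0) <<< (15:Int))]) []) []

-- ===== PORT B =====
def pack_binary_alt (data : List (List (Int × Int))) : List Int :=
  let flat := data.flatMap (fun row => row.map (fun p => PySem.Int.bor (p.1 <<< (9:Int)) p.2))
  let starts := (data.foldl (fun (st : List Int × Int) row =>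
      (if row.isEmpty then st.1 else st.1 ++ [st.2], st.2 + row.length)) ([], 0)).1
  (PySem.List.enumerate flat).map (fun iv =>
    if starts.contains iv.1 then PySem.Int.bor iv.2 ((1:Int) <<< (15:Int)) else iv.2)

-- ===== PRECONDITION & SPEC =====
def Spec_pack_binary (data : List (List (Int × Int))) (out : List Int) : Prop := out = pack_binary_alt data
instance (data : List (List (Int × Int))) (out : List Int) : Decidable (Spec_pack_binary data out) := by unfold Spec_pack_binary; infer_instance

-- ===== CLAIM (what is proved, stated in full; the proofs are below) =====
def Claim_equal_pack_binary : Prop := ∀ (data : List (List (Int × Int))), Dom_pack_binary data → Spec_pack_binary data (pack_binary data)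

-- ===== LEMMAS AND PROOFS =====

-- abbreviations used only by the proofs
def pvPack (p : Int × Int) : Int := PySem.Int.bor (p.1 <<< (9:Int)) p.2

def pvMark (v : Int) : Int := PySem.Int.bor v ((1:Int) <<< (15:Int))

-- B's per-row result, as produced globally by B's marking pass
def pvRowB (row : List (Int × Int)) : List Int :=
  match row.map pvPack with
  | [] => []
  | h :: t => pvMark h :: t

-- the start offsets of the non-empty rows, starting at offset n
def pvStarts (n : Int) : List (List (Int × Int)) → List Int
  | [] => []
  | row :: rest => (if row.isEmpty then [] else [n]) ++ pvStarts (n + row.length) rest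

theorem pvStarts_ge (data : List (List (Int × Int))) (n j : Int)
    (h : j ∈ pvStarts n data) : n ≤ j := by
  induction data generalizing n with
  | nil => simp [pvStarts] at h
  | cons row rest ih =>
      simp only [pvStarts, List.mem_append] at h
      rcases h with h | h
      · split at h <;> simp_all
      · have := ih (n + row.length) h; omega

-- B's foldl computes exactly pvStarts
theorem pvStarts_foldl (data : List (List (Int × Int))) (acc : List Int) (n : Int) :
    (data.foldl (fun (st : List Int × Int) row =>
      (if row.isEmpty then st.1 else st.1 ++ [st.2], st.2 + row.length)) (acc, n)).1
    = acc ++ pvStarts n data := by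
  induction data generalizing acc n with
  | nil => simp [pvStarts]
  | cons row rest ih =>
      cases h : row.isEmpty with
      | true => simp only [List.foldl_cons, h, if_true]; rw [ih]; simp [pvStarts, h]
      | false =>
          simp only [List.foldl_cons, h, Bool.false_eq_true, if_false]
          rw [ih]; simp [pvStarts, h, List.append_assoc]

-- marking pass over a stretch that contains no start offset: identity
theorem pvNoMark (t : List (Int × Int)) (m : Int) (L : List Int)
    (hL : ∀ j ∈ L, j < m ∨ m + t.length ≤ j) :
    (PySem.List.enumerate (t.map pvPack) m).map (fun iv =>
      if L.contains iv.1 then pvMark iv.2 else iv.2) = t.map pvPack := by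
  induction t generalizing m with
  | nil => simp [PySem.List.enumerate_nil]
  | cons p t ih =>
      have hm : ¬ (L.contains m = true) := by
        simp only [List.contains_eq_mem, decide_eq_true_eq]
        intro hmem
        rcases hL m hmem with h | h <;> simp at h <;> omega
      simp only [List.map_cons, PySem.List.enumerate_cons, List.map_cons]
      rw [if_neg hm,
        ih (m + 1) (by intro j hj; rcases hL j hj with h | h <;> simp at h ⊢ <;> omega)]

-- main lemma: B's marking pass produces A's per-row concatenation
theorem pvMain (data : List (List (Int × Int))) (n : Int) (pre : List Int)
    (hpre : ∀ j ∈ pre, j < n) :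
    (PySem.List.enumerate
        (data.flatMap (fun row => row.map pvPack)) n).map (fun iv =>
      if (pre ++ pvStarts n data).contains iv.1 then pvMark iv.2 else iv.2)
    = data.flatMap pvRowB := by
  induction data generalizing n pre with
  | nil => simp [pvStarts, PySem.List.enumerate_nil]
  | cons row rest ih =>
      rw [List.flatMap_cons, PySem.List.enumerate_append, List.map_append,
        List.length_map]
      have tailEq :
          (PySem.List.enumerate (rest.flatMap (fun r => r.map pvPack))
              (n + (row.length : Int))).map (fun iv =>
            if (pre ++ pvStarts n (row :: rest)).contains iv.1 then pvMark iv.2 else iv.2)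
          = rest.flatMap pvRowB := by
        have : pre ++ pvStarts n (row :: rest)
            = (pre ++ (if row.isEmpty then [] else [n])) ++ pvStarts (n + row.length) rest := by
          simp [pvStarts, List.append_assoc]
        rw [this]
        exact ih (n + row.length) _ (by
          intro j hj
          simp only [List.mem_append] at hj
          rcases hj with hj | hj
          · have := hpre j hj
            have : (0:Int) ≤ row.length := by positivity
            omega
          · by_cases hrow : row.isEmpty
            · simp [hrow] at hj
            · simp only [hrow, Bool.false_eq_true, if_false, List.mem_singleton] at hj
              subst hj
              have hne : row ≠ [] := by simpa using hrow
              have hlen : 0 < row.length := List.length_pos_of_ne_nil hne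
              omega)
      rw [tailEq]
      cases row with
      | nil => simp [pvRowB, PySem.List.enumerate_nil]
      | cons p t =>
          simp only [List.map_cons, PySem.List.enumerate_cons, List.map_cons]
          have hmemn : ((pre ++ pvStarts n ((p :: t) :: rest)).contains n) = true := by
            simp only [List.contains_eq_mem, decide_eq_true_eq, List.mem_append]
            right
            simp [pvStarts]
          rw [if_pos hmemn]
          have hrest :
              (PySem.List.enumerate (t.map pvPack) (n + 1)).map (fun iv =>
                if (pre ++ pvStarts n ((p :: t) :: rest)).contains iv.1
                then pvMark iv.2 else iv.2) = t.map pvPack := by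
            apply pvNoMark
            intro j hj
            simp only [List.mem_append] at hj
            rcases hj with hj | hj
            · left; have := hpre j hj; omega
            · simp only [pvStarts, List.isEmpty, List.mem_append] at hj
              rcases hj with hj | hj
              · simp at hj; omega
              · right
                have := pvStarts_ge rest (n + ((p :: t).length : Int)) j hj
                simp only [List.length_cons] at this ⊢
                push_cast at this ⊢
                omega
          rw [hrest]
          simp [pvRowB, pvMark, pvPack]

-- ===== lemmas relating A to the flatMap-of-rows form =====

theorem pack_inner (t : List (Int × Int)) (s : Int) (acc : List Int) (hs : 1 ≤ s) :
    (PySem.List.enumerate t s).foldl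
      (fun new_row ip =>
        new_row ++ [PySem.Int.bor (PySem.Int.bor (ip.2.1 <<< (9:Int)) ip.2.2)
                      ((if ip.1 == 0 then (1:Int) else 0) <<< (15:Int))]) acc
    = acc ++ t.map pvPack := by
  induction t generalizing s acc with
  | nil => simp [PySem.List.enumerate_nil]
  | cons p t ih =>
      have hne : ¬ ((s == 0) = true) := by simp; omega
      have h0 : (if (s == 0) = true then (1:Int) else 0) <<< (15:Int) = 0 := by
        rw [if_neg hne]; decide
      rw [PySem.List.enumerate_cons, List.foldl_cons, ih (s+1) _ (by omega), h0,
          PySem.Int.bor_zero]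
      simp [pvPack]

theorem pack_row (row : List (Int × Int)) :
    (PySem.List.enumerate row).foldl
      (fun new_row ip =>
        new_row ++ [PySem.Int.bor (PySem.Int.bor (ip.2.1 <<< (9:Int)) ip.2.2)
                      ((if ip.1 == 0 then (1:Int) else 0) <<< (15:Int))]) []
    = pvRowB row := by
  cases row with
  | nil => simp [PySem.List.enumerate_nil, pvRowB]
  | cons p t =>
      rw [PySem.List.enumerate_cons, List.foldl_cons,
          show (0:Int) + 1 = 1 from by norm_num, pack_inner t 1 _ (by omega)]
      simp [pvRowB, pvMark, pvPack]

theorem pack_outer (data : List (List (Int × Int))) (acc : List Int) :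
    data.foldl (fun res row =>
      res ++ (PySem.List.enumerate row).foldl
        (fun new_row ip =>
          new_row ++ [PySem.Int.bor (PySem.Int.bor (ip.2.1 <<< (9:Int)) ip.2.2)
                        ((if ip.1 == 0 then (1:Int) else 0) <<< (15:Int))]) []) acc
    = acc ++ data.flatMap pvRowB := by
  induction data generalizing acc with
  | nil => simp
  | cons row rest ih =>
      rw [List.foldl_cons, ih, pack_row row, List.flatMap_cons, List.append_assoc]

-- ===== VERDICT (by name: the statement is the Claim_ definition above) =====
theorem pack_binary_spec : Claim_equal_pack_binary := by
  intro data _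
  unfold Spec_pack_binary pack_binary pack_binary_alt
  rw [pack_outer data [], List.nil_append]
  rw [pvStarts_foldl data [] 0, List.nil_append]
  have := pvMain data 0 [] (by intro j hj; simp at hj)
  simpa [pvPack, pvMark] using this.symm
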